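-- pv_equiv track=rewrite | github.com/Jonathan-WIS/R2RILS | R2RILS.py | generate_sparse_matrix_entries
-- ===== SOURCE A (Python) =====
-- def generate_sparse_matrix_entries(omega, rank, n_1, n_2):
--     row_entries = []
--     columns_entries = []
--     row = 0
--     for j in range(n_1):
--         for k in range(n_2):
--             if 0 != omega[j][k]:
--                 # add indices for U entries
--                 for l in range(rank):
--                     columns_entries.append(k * rank + l)
--                     row_entries.append(row)
--                 # add indices for V entries
--                 for l in range(rank):
--                     columns_entries.append((n_2 + j) * rank + l)
--                     row_entries.append(row)
--                 row += 1
--     return row_entries, columns_entries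
-- ===== SOURCE B (Python) =====
-- def generate_sparse_matrix_entries(omega, rank, n_1, n_2):
--     positions = [(j, k) for j in range(n_1) for k in range(n_2) if omega[j][k] != 0]
--     row_entries = []
--     columns_entries = []
--     for t in range(2 * rank * len(positions)):
--         row, l = divmod(t, 2 * rank)
--         j, k = positions[row]
--         if l < rank:
--             columns_entries.append(k * rank + l)
--         else:
--             columns_entries.append((n_2 + j) * rank + (l - rank))
--         row_entries.append(row)
--     return row_entries, columns_entries
-- ===== Notes on version B (the rewrite author's own statement) =====
-- stated objective: alternative
-- what changed: Replaces A's four nested loops with a running row counter by a two-phase construction: first collect the ordered nonzero positions, then a single flat loop over range(2*rank*m) that recovers (row, slot) per output entry by divmod arithmetic and computes each column index directly, with no inner per-entry loops.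
import Mathlib
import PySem

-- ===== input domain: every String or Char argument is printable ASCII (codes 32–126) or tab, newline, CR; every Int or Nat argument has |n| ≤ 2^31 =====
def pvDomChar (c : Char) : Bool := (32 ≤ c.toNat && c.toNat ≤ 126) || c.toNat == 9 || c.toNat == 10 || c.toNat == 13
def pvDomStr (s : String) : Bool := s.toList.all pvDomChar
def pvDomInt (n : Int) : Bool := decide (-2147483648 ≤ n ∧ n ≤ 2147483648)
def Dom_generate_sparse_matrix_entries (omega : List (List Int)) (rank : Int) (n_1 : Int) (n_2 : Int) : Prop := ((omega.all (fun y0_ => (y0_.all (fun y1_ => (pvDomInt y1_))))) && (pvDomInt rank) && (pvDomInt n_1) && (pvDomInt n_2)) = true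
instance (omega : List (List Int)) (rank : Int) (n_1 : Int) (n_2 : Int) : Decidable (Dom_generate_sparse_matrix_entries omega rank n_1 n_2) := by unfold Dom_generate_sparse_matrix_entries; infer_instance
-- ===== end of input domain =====

-- B replaces A's four nested loops with a running row counter by a two-phase construction
-- (collect nonzero positions, then one flat divmod-indexed loop over range(2*rank*m));
-- objective: alternative.

-- ===== PORT A =====
-- the two inner 'for l in range(rank)' loops of A, appending (row, c+l) pairs to (row_entries, columns_entries)
def pvEmitA (rank c row : Int) (q : List Int × List Int) : List Int × List Int :=
  (PySem.List.pyRange 0 rank 1).foldl (fun q l => (q.1 ++ [row], q.2 ++ [c + l])) q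

def generate_sparse_matrix_entries (omega : List (List Int)) (rank : Int) (n_1 : Int) (n_2 : Int) : List Int × List Int :=
  let st :=
    (PySem.List.pyRange 0 n_1 1).foldl (fun st j =>
      (PySem.List.pyRange 0 n_2 1).foldl (fun (st : (List Int × List Int) × Int) k =>
        if (0 : Int) ≠ PySem.List.pyGetD (PySem.List.pyGetD omega j []) k 0 then
          (pvEmitA rank ((n_2 + j) * rank) st.2 (pvEmitA rank (k * rank) st.2 st.1), st.2 + 1)
        else st) st) (([], []), 0)
  st.1

-- ===== PORT B =====
def generate_sparse_matrix_entries_alt (omega : List (List Int)) (rank : Int) (n_1 : Int) (n_2 : Int) : List Int × List Int :=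
  let positions : List (Int × Int) :=
    (PySem.List.pyRange 0 n_1 1).flatMap (fun j =>
      ((PySem.List.pyRange 0 n_2 1).filter
        (fun k => PySem.List.pyGetD (PySem.List.pyGetD omega j []) k 0 ≠ 0)).map (fun k => (j, k)))
  (PySem.List.pyRange 0 (2 * rank * (positions.length : Int)) 1).foldl
    (fun (st : List Int × List Int) t =>
      let row := PySem.Int.floordiv t (2 * rank)
      let l := PySem.Int.mod t (2 * rank)
      let p := PySem.List.pyGetD positions row (0, 0)
      (st.1 ++ [row],
       st.2 ++ [if l < rank then p.2 * rank + l else (n_2 + p.1) * rank + (l - rank)]))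
    ([], [])

-- ===== PRECONDITION & SPEC =====
-- Pre_ excludes exactly the inputs where Python A raises IndexError: when the loops actually
-- index (n_1 > 0 and n_2 > 0), omega must have at least n_1 rows each of length at least n_2.
def Pre_generate_sparse_matrix_entries (omega : List (List Int)) (rank : Int) (n_1 : Int) (n_2 : Int) : Prop :=
  0 < n_1 → 0 < n_2 →
    (n_1 ≤ (omega.length : Int) ∧ ∀ r ∈ omega.take n_1.toNat, n_2 ≤ (r.length : Int))
instance (omega : List (List Int)) (rank : Int) (n_1 : Int) (n_2 : Int) : Decidable (Pre_generate_sparse_matrix_entries omega rank n_1 n_2) := by unfold Pre_generate_sparse_matrix_entries; infer_instance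

def pvWitness_generate_sparse_matrix_entries : List (List Int) × Int × Int × Int := ([[1, 0], [0, 2]], 2, 2, 2)

def Spec_generate_sparse_matrix_entries (omega : List (List Int)) (rank : Int) (n_1 : Int) (n_2 : Int) (out : List Int × List Int) : Prop := out = generate_sparse_matrix_entries_alt omega rank n_1 n_2
instance (omega : List (List Int)) (rank : Int) (n_1 : Int) (n_2 : Int) (out : List Int × List Int) : Decidable (Spec_generate_sparse_matrix_entries omega rank n_1 n_2 out) := by unfold Spec_generate_sparse_matrix_entries; infer_instance

-- ===== CLAIM (what is proved, stated in full; the proofs are below) =====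
def Claim_equal_generate_sparse_matrix_entries : Prop := ∀ (omega : List (List Int)) (rank : Int) (n_1 : Int) (n_2 : Int), Dom_generate_sparse_matrix_entries omega rank n_1 n_2 → Pre_generate_sparse_matrix_entries omega rank n_1 n_2 → Spec_generate_sparse_matrix_entries omega rank n_1 n_2 (generate_sparse_matrix_entries omega rank n_1 n_2)

-- ===== LEMMAS AND PROOFS =====

-- entry omega[j][k] as both ports read it
def pvE (omega : List (List Int)) (j k : Int) : Int :=
  PySem.List.pyGetD (PySem.List.pyGetD omega j []) k 0

-- the ordered list of nonzero mask positions, as B builds it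
def pvPositions (omega : List (List Int)) (n_1 n_2 : Int) : List (Int × Int) :=
  (PySem.List.pyRange 0 n_1 1).flatMap (fun j =>
    ((PySem.List.pyRange 0 n_2 1).filter (fun k => pvE omega j k ≠ 0)).map (fun k => (j, k)))

-- per-position step on the state ((rows, cols), row)
def pvStepP (rank n_2 : Int) (st : (List Int × List Int) × Int) (p : Int × Int) : (List Int × List Int) × Int :=
  ((st.1.1 ++ List.replicate (2 * rank).toNat st.2,
    st.1.2 ++ (PySem.List.pyRange (p.2 * rank) (p.2 * rank + rank) 1 ++
               PySem.List.pyRange ((n_2 + p.1) * rank) ((n_2 + p.1) * rank + rank) 1)),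
   st.2 + 1)

def pvRows (rank a b : Int) : List Int :=
  (PySem.List.pyRange a b 1).flatMap (fun r => List.replicate (2 * rank).toNat r)

def pvCols (rank n_2 : Int) (pos : List (Int × Int)) : List Int :=
  pos.flatMap (fun p =>
    PySem.List.pyRange (p.2 * rank) (p.2 * rank + rank) 1 ++
    PySem.List.pyRange ((n_2 + p.1) * rank) ((n_2 + p.1) * rank + rank) 1)

lemma foldl_emit (ls : List Int) (c row : Int) (q : List Int × List Int) :
    ls.foldl (fun q l => (q.1 ++ [row], q.2 ++ [c + l])) q
      = (q.1 ++ List.replicate ls.length row, q.2 ++ ls.map (fun l => c + l)) := by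
  induction ls generalizing q with
  | nil => simp
  | cons x xs ih =>
      simp [List.foldl_cons, ih, List.replicate_succ]

lemma map_add_pyRange (c r : Int) :
    (PySem.List.pyRange 0 r 1).map (fun l => c + l) = PySem.List.pyRange c (c + r) 1 := by
  rw [PySem.List.pyRange_one 0 r, PySem.List.pyRange_one c (c + r)]
  simp [Function.comp_def]

lemma emitA_eq (rank c row : Int) (q : List Int × List Int) :
    pvEmitA rank c row q = (q.1 ++ List.replicate rank.toNat row, q.2 ++ PySem.List.pyRange c (c + rank) 1) := by
  unfold pvEmitA
  rw [foldl_emit, map_add_pyRange]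
  simp [PySem.List.length_pyRange_one]

lemma toNat_two_mul (r : Int) : (2 * r).toNat = r.toNat + r.toNat := by omega

-- A's inner k-loop for a fixed j equals the positions-driven fold over that row's positions
lemma innerA_eq (omega : List (List Int)) (rank n_2 : Int) (j : Int) (ks : List Int)
    (st : (List Int × List Int) × Int) :
    ks.foldl (fun (st : (List Int × List Int) × Int) k =>
        if (0 : Int) ≠ pvE omega j k then
          (pvEmitA rank ((n_2 + j) * rank) st.2 (pvEmitA rank (k * rank) st.2 st.1), st.2 + 1)
        else st) st
      = ((ks.filter (fun k => pvE omega j k ≠ 0)).map (fun k => (j, k))).foldl (pvStepP rank n_2) st := by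
  induction ks generalizing st with
  | nil => rfl
  | cons k ks ih =>
      rw [List.foldl_cons, List.filter_cons]
      by_cases h : pvE omega j k = 0
      · rw [if_neg (fun hn => hn h.symm)]
        rw [show (decide (pvE omega j k ≠ 0)) = false by simp [h]]
        rw [if_neg (by simp)]
        exact ih st
      · rw [if_pos (Ne.symm h)]
        rw [show (decide (pvE omega j k ≠ 0)) = true by simp [h]]
        rw [if_pos rfl, List.map_cons, List.foldl_cons]
        rw [ih]
        have hst : (pvEmitA rank ((n_2 + j) * rank) st.2 (pvEmitA rank (k * rank) st.2 st.1), st.2 + 1)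
            = pvStepP rank n_2 st (j, k) := by
          rw [emitA_eq, emitA_eq]
          unfold pvStepP
          rw [toNat_two_mul, List.replicate_add]
          simp only [List.append_assoc]
        rw [hst]

lemma foldP_eq (rank n_2 : Int) (pos : List (Int × Int)) (rows cols : List Int) (row : Int) :
    pos.foldl (pvStepP rank n_2) ((rows, cols), row)
      = ((rows ++ pvRows rank row (row + pos.length), cols ++ pvCols rank n_2 pos),
         row + pos.length) := by
  induction pos generalizing rows cols row with
  | nil => simp [pvRows, pvCols, PySem.List.pyRange_one_eq_nil]
  | cons p ps ih =>
      simp only [List.foldl_cons, pvStepP]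
      rw [ih]
      have hsplit : pvRows rank row (row + (List.length (p :: ps) : Int)) =
          List.replicate (2 * rank).toNat row ++ pvRows rank (row + 1) (row + 1 + ps.length) := by
        unfold pvRows
        rw [PySem.List.pyRange_one_cons (by push_cast [List.length_cons]; omega)]
        rw [List.flatMap_cons]
        congr 2 <;> (push_cast [List.length_cons]; ring)
      rw [hsplit]
      simp only [pvCols, List.flatMap_cons, Prod.mk.injEq]
      refine ⟨⟨by simp [List.append_assoc], by simp [List.append_assoc]⟩,
        by push_cast [List.length_cons]; ring⟩

lemma flatMap_foldl {α β σ : Type} (js : List α) (f : α → List β) (g : σ → β → σ) (st : σ) :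
    (js.flatMap f).foldl g st = js.foldl (fun st j => (f j).foldl g st) st := by
  induction js generalizing st with
  | nil => rfl
  | cons j js ih => simp [List.flatMap_cons, List.foldl_append, ih]

-- A's port computes (pvRows, pvCols) over the positions list
lemma A_eq (omega : List (List Int)) (rank n_1 n_2 : Int) :
    generate_sparse_matrix_entries omega rank n_1 n_2
      = (pvRows rank 0 ((pvPositions omega n_1 n_2).length : Int),
         pvCols rank n_2 (pvPositions omega n_1 n_2)) := by
  unfold generate_sparse_matrix_entries
  have hfun : (fun (st : (List Int × List Int) × Int) (j : Int) =>
      (PySem.List.pyRange 0 n_2 1).foldl (fun (st : (List Int × List Int) × Int) k =>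
        if (0 : Int) ≠ PySem.List.pyGetD (PySem.List.pyGetD omega j []) k 0 then
          (pvEmitA rank ((n_2 + j) * rank) st.2 (pvEmitA rank (k * rank) st.2 st.1), st.2 + 1)
        else st) st)
      = (fun (st : (List Int × List Int) × Int) (j : Int) =>
          (((PySem.List.pyRange 0 n_2 1).filter (fun k => pvE omega j k ≠ 0)).map
              (fun k => (j, k))).foldl (pvStepP rank n_2) st) := by
    funext st j
    exact innerA_eq omega rank n_2 j _ st
  show ((PySem.List.pyRange 0 n_1 1).foldl _ (([], []), 0)).1 = _
  rw [hfun, ← flatMap_foldl]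
  rw [show ((PySem.List.pyRange 0 n_1 1).flatMap (fun j =>
      ((PySem.List.pyRange 0 n_2 1).filter (fun k => pvE omega j k ≠ 0)).map (fun k => (j, k))))
      = pvPositions omega n_1 n_2 from rfl]
  rw [foldP_eq]
  simp

-- the two per-output-entry index functions of B
def pvRowOf (rank t : Int) : Int := PySem.Int.floordiv t (2 * rank)

def pvColOf (rank n_2 : Int) (pos : List (Int × Int)) (t : Int) : Int :=
  if PySem.Int.mod t (2 * rank) < rank then
    (PySem.List.pyGetD pos (pvRowOf rank t) (0, 0)).2 * rank + PySem.Int.mod t (2 * rank)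
  else
    (n_2 + (PySem.List.pyGetD pos (pvRowOf rank t) (0, 0)).1) * rank +
      (PySem.Int.mod t (2 * rank) - rank)

lemma foldl_pair_append {α : Type} (l : List α) (f g : α → Int) (xs ys : List Int) :
    l.foldl (fun (st : List Int × List Int) t => (st.1 ++ [f t], st.2 ++ [g t])) (xs, ys)
      = (xs ++ l.map f, ys ++ l.map g) := by
  induction l generalizing xs ys with
  | nil => simp
  | cons a l ih => simp [List.foldl_cons, ih]

lemma floordiv_block {rank L : Int} (hr : 0 < rank) {t : Int}
    (h1 : 2 * rank * L ≤ t) (h2 : t < 2 * rank * (L + 1)) :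
    PySem.Int.floordiv t (2 * rank) = L := by
  rw [PySem.Int.floordiv_eq_iff_of_pos (by omega)]
  constructor <;> nlinarith

lemma mod_block {rank L : Int} (hr : 0 < rank) {t : Int}
    (h1 : 2 * rank * L ≤ t) (h2 : t < 2 * rank * (L + 1)) :
    PySem.Int.mod t (2 * rank) = t - 2 * rank * L := by
  have hd := PySem.Int.floordiv_mul_add_mod t (2 * rank)
  rw [floordiv_block hr h1 h2] at hd
  linarith

lemma rowOf_bounds (rank L : Int) (hr : 0 < rank) {t : Int} (h0 : 0 ≤ t)
    (h1 : t < 2 * rank * L) : 0 ≤ pvRowOf rank t ∧ pvRowOf rank t < L := by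
  constructor
  · exact (PySem.Int.le_floordiv_iff_mul_le (by omega)).mpr (by simpa using h0)
  · exact (PySem.Int.floordiv_lt_iff_lt_mul (by omega)).mpr (by nlinarith)

lemma getD_append_left (ps : List (Int × Int)) (p : Int × Int) {i : Int}
    (h0 : 0 ≤ i) (h1 : i < (ps.length : Int)) :
    PySem.List.pyGetD (ps ++ [p]) i (0, 0) = PySem.List.pyGetD ps i (0, 0) := by
  rw [PySem.List.pyGetD_eq_getElem _ _ h0 (by push_cast [List.length_append]; omega),
      PySem.List.pyGetD_eq_getElem _ _ h0 h1]
  exact List.getElem_append_left (by omega)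

-- cols on the first 2*rank*|ps| flat indices never look at the appended position
lemma head_cols (rank n_2 : Int) (hr : 0 < rank) (ps : List (Int × Int)) (p : Int × Int) :
    ∀ t ∈ PySem.List.pyRange 0 (2 * rank * (ps.length : Int)) 1,
      pvColOf rank n_2 (ps ++ [p]) t = pvColOf rank n_2 ps t := by
  intro t ht
  rw [PySem.List.mem_pyRange_one] at ht
  obtain ⟨h0, h1⟩ := rowOf_bounds rank _ hr ht.1 ht.2
  unfold pvColOf
  rw [getD_append_left ps p h0 h1]

lemma tail_rows (rank L : Int) (hr : 0 < rank) :
    (PySem.List.pyRange (2 * rank * L) (2 * rank * (L + 1)) 1).map (pvRowOf rank)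
      = List.replicate (2 * rank).toNat L := by
  rw [PySem.List.pyRange_one, List.map_map]
  rw [show 2 * rank * (L + 1) - 2 * rank * L = 2 * rank from by ring]
  rw [List.map_congr_left (g := fun _ => L) ?_]
  · rw [List.map_const', List.length_range]
  · intro k hk
    rw [List.mem_range] at hk
    have hk' : (k : Int) < 2 * rank := by omega
    have h1 : 2 * rank * L ≤ 2 * rank * L + (k : Int) :=
      le_add_of_nonneg_right (Int.natCast_nonneg k)
    have hexp : 2 * rank * (L + 1) = 2 * rank * L + 2 * rank := by ring
    have h2 : 2 * rank * L + (k : Int) < 2 * rank * (L + 1) := by rw [hexp]; linarith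
    exact floordiv_block hr h1 h2

lemma tail_cols (rank n_2 L : Int) (hr : 0 < rank) (pos : List (Int × Int)) (p : Int × Int)
    (hp : PySem.List.pyGetD pos L (0, 0) = p) :
    (PySem.List.pyRange (2 * rank * L) (2 * rank * (L + 1)) 1).map (pvColOf rank n_2 pos)
      = PySem.List.pyRange (p.2 * rank) (p.2 * rank + rank) 1 ++
        PySem.List.pyRange ((n_2 + p.1) * rank) ((n_2 + p.1) * rank + rank) 1 := by
  rw [PySem.List.pyRange_one (2 * rank * L), List.map_map]
  rw [show 2 * rank * (L + 1) - 2 * rank * L = 2 * rank from by ring]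
  rw [show (2 * rank).toNat = rank.toNat + rank.toNat from by omega]
  rw [List.range_add, List.map_append, List.map_map]
  rw [PySem.List.pyRange_one (p.2 * rank), PySem.List.pyRange_one ((n_2 + p.1) * rank)]
  rw [show p.2 * rank + rank - p.2 * rank = rank from by ring]
  rw [show (n_2 + p.1) * rank + rank - (n_2 + p.1) * rank = rank from by ring]
  congr 1
  · apply List.map_congr_left
    intro k hk
    rw [List.mem_range] at hk
    have hkr : (k : Int) < rank := by omega
    have h1 : 2 * rank * L ≤ 2 * rank * L + (k : Int) :=
      le_add_of_nonneg_right (Int.natCast_nonneg k)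
    have hexp : 2 * rank * (L + 1) = 2 * rank * L + 2 * rank := by ring
    have h2 : 2 * rank * L + (k : Int) < 2 * rank * (L + 1) := by rw [hexp]; linarith
    simp only [Function.comp]
    unfold pvColOf pvRowOf
    rw [floordiv_block hr h1 h2, mod_block hr h1 h2, hp]
    rw [show 2 * rank * L + (k : Int) - 2 * rank * L = (k : Int) from by ring]
    rw [if_pos hkr]
  · apply List.map_congr_left
    intro k hk
    rw [List.mem_range] at hk
    have hcast : ((rank.toNat + k : Nat) : Int) = rank + (k : Int) := by
      push_cast [Int.toNat_of_nonneg hr.le]; ring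
    have hkr : (k : Int) < rank := by omega
    have h1 : 2 * rank * L ≤ 2 * rank * L + (rank + (k : Int)) := by
      have hnn : (0 : Int) ≤ rank + (k : Int) := by positivity
      linarith
    have hexp : 2 * rank * (L + 1) = 2 * rank * L + 2 * rank := by ring
    have h2 : 2 * rank * L + (rank + (k : Int)) < 2 * rank * (L + 1) := by rw [hexp]; linarith
    simp only [Function.comp]
    rw [hcast]
    unfold pvColOf pvRowOf
    rw [floordiv_block hr h1 h2, mod_block hr h1 h2, hp]
    rw [show 2 * rank * L + (rank + (k : Int)) - 2 * rank * L = rank + (k : Int) from by ring]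
    rw [if_neg (by omega)]
    ring

lemma rows_split (rank L : Int) (hL : 0 ≤ L) :
    pvRows rank 0 (L + 1) = pvRows rank 0 L ++ List.replicate (2 * rank).toNat L := by
  unfold pvRows
  rw [PySem.List.pyRange_one_append 0 L (L + 1) hL (by omega), List.flatMap_append]
  congr 1
  rw [show PySem.List.pyRange L (L + 1) 1 = [L] from by
        rw [PySem.List.pyRange_one]; norm_num]
  simp

lemma cols_split (rank n_2 : Int) (ps : List (Int × Int)) (p : Int × Int) :
    pvCols rank n_2 (ps ++ [p])
      = pvCols rank n_2 ps ++
        (PySem.List.pyRange (p.2 * rank) (p.2 * rank + rank) 1 ++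
         PySem.List.pyRange ((n_2 + p.1) * rank) ((n_2 + p.1) * rank + rank) 1) := by
  unfold pvCols
  rw [List.flatMap_append]
  simp

-- B's flat-index maps over a whole positions list equal pvRows / pvCols (positive rank)
lemma B_blocks (rank n_2 : Int) (hr : 0 < rank) (pos : List (Int × Int)) :
    (PySem.List.pyRange 0 (2 * rank * (pos.length : Int)) 1).map (pvRowOf rank)
        = pvRows rank 0 (pos.length : Int)
    ∧ (PySem.List.pyRange 0 (2 * rank * (pos.length : Int)) 1).map (pvColOf rank n_2 pos)
        = pvCols rank n_2 pos := by
  induction pos using List.reverseRecOn with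
  | nil => constructor <;> simp [pvRows, pvCols, PySem.List.pyRange_one]
  | append_singleton ps p ih =>
      obtain ⟨ihr, ihc⟩ := ih
      have hL0 : (0 : Int) ≤ (ps.length : Int) := Int.natCast_nonneg _
      have hlen : (((ps ++ [p]).length : Nat) : Int) = (ps.length : Int) + 1 := by
        rw [List.length_append, List.length_singleton]; push_cast; ring
      have hp : PySem.List.pyGetD (ps ++ [p]) ((ps.length : Nat) : Int) (0, 0) = p := by
        rw [PySem.List.pyGetD_eq_getElem _ _ hL0 (by rw [List.length_append, List.length_singleton]; push_cast; omega)]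
        exact List.getElem_concat_length (by simp) _
      have hnn : (0 : Int) ≤ 2 * rank * (ps.length : Int) := by positivity
      have hle : 2 * rank * (ps.length : Int) ≤ 2 * rank * ((ps.length : Int) + 1) := by nlinarith
      rw [hlen,
          PySem.List.pyRange_one_append 0 (2 * rank * (ps.length : Int))
            (2 * rank * ((ps.length : Int) + 1)) hnn hle]
      constructor
      · rw [List.map_append, ihr, tail_rows rank _ hr, rows_split rank _ hL0]
      · rw [List.map_append, List.map_congr_left (head_cols rank n_2 hr ps p), ihc,
            tail_cols rank n_2 _ hr (ps ++ [p]) p hp, cols_split]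

-- rewriting B's port through pvRowOf/pvColOf
lemma B_eq_maps (omega : List (List Int)) (rank n_1 n_2 : Int) :
    generate_sparse_matrix_entries_alt omega rank n_1 n_2
      = ((PySem.List.pyRange 0 (2 * rank * ((pvPositions omega n_1 n_2).length : Int)) 1).map
            (pvRowOf rank),
         (PySem.List.pyRange 0 (2 * rank * ((pvPositions omega n_1 n_2).length : Int)) 1).map
            (pvColOf rank n_2 (pvPositions omega n_1 n_2))) := by
  unfold generate_sparse_matrix_entries_alt
  exact foldl_pair_append _ (pvRowOf rank) (pvColOf rank n_2 (pvPositions omega n_1 n_2)) [] []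

-- B's port computes the same pair (all ranks; for rank ≤ 0 every list is empty)
lemma B_eq (omega : List (List Int)) (rank n_1 n_2 : Int) :
    generate_sparse_matrix_entries_alt omega rank n_1 n_2
      = (pvRows rank 0 ((pvPositions omega n_1 n_2).length : Int),
         pvCols rank n_2 (pvPositions omega n_1 n_2)) := by
  rw [B_eq_maps]
  by_cases hr : 0 < rank
  · have h := B_blocks rank n_2 hr (pvPositions omega n_1 n_2)
    rw [h.1, h.2]
  · have h2r : 2 * rank * ((pvPositions omega n_1 n_2).length : Int) ≤ 0 := by
      have hn : (0 : Int) ≤ ((pvPositions omega n_1 n_2).length : Int) := Int.natCast_nonneg _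
      nlinarith
    have hempty :
        PySem.List.pyRange 0 (2 * rank * ((pvPositions omega n_1 n_2).length : Int)) 1 = [] :=
      PySem.List.pyRange_one_eq_nil h2r
    have hrows : pvRows rank 0 ((pvPositions omega n_1 n_2).length : Int) = [] := by
      unfold pvRows
      have h0 : (2 * rank).toNat = 0 := by omega
      simp [h0]
    have hcols : pvCols rank n_2 (pvPositions omega n_1 n_2) = [] := by
      unfold pvCols
      apply List.flatMap_eq_nil_iff.mpr
      intro p _
      rw [PySem.List.pyRange_one_eq_nil (by omega), PySem.List.pyRange_one_eq_nil (by omega)]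
      simp
    rw [hempty, hrows, hcols]
    simp

-- ===== VERDICT (by name: the statement is the Claim_ definition above) =====
theorem generate_sparse_matrix_entries_spec : Claim_equal_generate_sparse_matrix_entries := by
  intro omega rank n_1 n_2 _ _
  unfold Spec_generate_sparse_matrix_entries
  rw [A_eq, B_eq]
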